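-- pv_equiv track=rewrite | github.com/WillHarri/code-wars | twiceasold.py | twice_as_old
-- ===== SOURCE A (Python) =====
-- def twice_as_old(dad_years_old, son_years_old):
--     age = dad_years_old
--     original_son_years_old = son_years_old
--     original_dad_years_old = dad_years_old
--     while dad_years_old != son_years_old * 2:
--             while son_years_old > 0:
--                 dad_years_old -= 1
--                 son_years_old -= 1
--             original_dad_years_old += 1
--             original_son_years_old += 1
--             dad_years_old = original_dad_years_old
--             son_years_old = original_son_years_old
--     return abs(dad_years_old - age)
-- ===== SOURCE B (Python) =====
-- def twice_as_old(dad_years_old, son_years_old):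
--     # closed form: dad catches being twice son's age after dad - 2*son years
--     return dad_years_old - 2 * son_years_old
-- ===== Notes on version B (the rewrite author's own statement) =====
-- stated objective: simpler
-- what changed: Replaced the nested simulation loops (decrement-to-zero inner loop plus increment-and-retry outer loop) with the closed form dad - 2*son.
import Mathlib
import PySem

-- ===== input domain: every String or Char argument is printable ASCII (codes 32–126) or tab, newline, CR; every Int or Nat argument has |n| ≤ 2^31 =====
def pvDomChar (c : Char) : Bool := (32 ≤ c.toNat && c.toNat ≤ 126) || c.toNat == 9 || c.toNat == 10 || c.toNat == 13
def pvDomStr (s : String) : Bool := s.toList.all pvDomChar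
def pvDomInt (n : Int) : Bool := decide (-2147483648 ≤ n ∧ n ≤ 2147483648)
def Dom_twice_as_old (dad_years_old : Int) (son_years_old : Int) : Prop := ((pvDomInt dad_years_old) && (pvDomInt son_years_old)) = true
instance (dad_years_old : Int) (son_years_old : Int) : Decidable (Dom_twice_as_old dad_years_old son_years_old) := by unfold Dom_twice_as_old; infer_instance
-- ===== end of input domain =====

-- B replaces A's nested simulation loops with the closed form dad - 2*son;
-- Pre_ excludes dad < 2*son, where A's outer loop never terminates.

-- ===== PORT A =====
-- inner loop: `while son_years_old > 0: dad -= 1; son -= 1`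
def pvInnerA (dad_years_old son_years_old : Int) : Int × Int :=
  if 0 < son_years_old then pvInnerA (dad_years_old - 1) (son_years_old - 1)
  else (dad_years_old, son_years_old)
termination_by son_years_old.toNat
decreasing_by omega

-- outer loop, with fuel only to make the (possibly divergent) loop total; the result of the
-- inner loop is overwritten by the reset, exactly as in A.
def pvOuterA (fuel : Nat) (odad oson dad son age : Int) : Int :=
  match fuel with
  | 0 => |dad - age|
  | f + 1 =>
      if dad = son * 2 then |dad - age|
      else
        let (_, _) := pvInnerA dad son
        pvOuterA f (odad + 1) (oson + 1) (odad + 1) (oson + 1) age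

def twice_as_old (dad_years_old : Int) (son_years_old : Int) : Int :=
  pvOuterA ((dad_years_old - 2 * son_years_old).toNat + 1)
    dad_years_old son_years_old dad_years_old son_years_old dad_years_old

-- ===== PORT B =====
def twice_as_old_alt (dad_years_old : Int) (son_years_old : Int) : Int :=
  dad_years_old - 2 * son_years_old

-- ===== PRECONDITION & SPEC =====
-- Pre_ excludes dad_years_old < 2 * son_years_old: there A's outer loop increments both ages
-- forever and never returns (no exception; it diverges).
def Pre_twice_as_old (dad_years_old : Int) (son_years_old : Int) : Prop :=
  2 * son_years_old ≤ dad_years_old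
instance (dad_years_old : Int) (son_years_old : Int) : Decidable (Pre_twice_as_old dad_years_old son_years_old) := by unfold Pre_twice_as_old; infer_instance

def pvWitness_twice_as_old : Int × Int := (10, 3)

def Spec_twice_as_old (dad_years_old : Int) (son_years_old : Int) (out : Int) : Prop := out = twice_as_old_alt dad_years_old son_years_old
instance (dad_years_old : Int) (son_years_old : Int) (out : Int) : Decidable (Spec_twice_as_old dad_years_old son_years_old out) := by unfold Spec_twice_as_old; infer_instance

-- ===== CLAIM (what is proved, stated in full; the proofs are below) =====
def Claim_equal_twice_as_old : Prop := ∀ (dad_years_old : Int) (son_years_old : Int), Dom_twice_as_old dad_years_old son_years_old → Pre_twice_as_old dad_years_old son_years_old → Spec_twice_as_old dad_years_old son_years_old (twice_as_old dad_years_old son_years_old)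

-- ===== LEMMAS AND PROOFS =====
-- The outer loop re-enters each iteration with dad = odad, son = oson, both bumped by 1;
-- it stops after exactly n = od - 2*os iterations, finishing at dad = od + n.
theorem pvOuterA_eval (n : Nat) : ∀ (fuel : Nat) (od os age : Int),
    od - os * 2 = (n : Int) → n < fuel →
    pvOuterA fuel od os od os age = |od + (n : Int) - age| := by
  induction n with
  | zero =>
    intro fuel od os age h hf
    match fuel, hf with
    | f + 1, _ =>
      have h2 : od = os * 2 := by omega
      simp only [pvOuterA, h2, if_true, if_pos rfl, Nat.cast_zero, add_zero]
  | succ n ih =>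
    intro fuel od os age h hf
    match fuel, hf with
    | f + 1, hf =>
      have hne : od ≠ os * 2 := by omega
      have := ih f (od + 1) (os + 1) age (by push_cast; push_cast at h; omega)
        (by omega)
      simp only [pvOuterA, hne, if_false]
      rw [this]
      congr 1
      push_cast
      ring

-- ===== VERDICT (by name: the statement is the Claim_ definition above) =====
theorem twice_as_old_spec : Claim_equal_twice_as_old := by
  intro dad son _ hpre
  unfold Pre_twice_as_old at hpre
  unfold Spec_twice_as_old twice_as_old twice_as_old_alt
  have hn : dad - son * 2 = ((dad - 2 * son).toNat : Int) := by omega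
  rw [pvOuterA_eval (dad - 2 * son).toNat _ dad son dad hn (by omega)]
  rw [← hn]
  have : dad + (dad - son * 2) - dad = dad - 2 * son := by ring
  rw [this]
  exact abs_of_nonneg (by omega)
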